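-- pv_equiv track=rewrite | github.com/Pedro777a/Criptografia | Practica2/Practica2.py | Listarelem
-- ===== SOURCE A (Python) =====
-- import math
--
-- def gcd(a,b):
--     while b!=0:
--         a, b = b, a%b
--     return a
--
-- def es_coprimo(num,tam):
--     # Evaluamos si a es coopimo de n
--     if(gcd(num,tam)==1):
--         return True
--
-- def Xgcd(a,n):
--     u,v=a,n
--     x1=1
--     x2=0
--     while u!=1:
--         q=math.floor(v/u)
--         r=v-q*u
--         x=x2-q*x1
--         v=u
--         u=r
--         x2=x1
--         x1=x
--     res = x1%n
--     return(res)
--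
-- def Listarelem(n):
--     ZEs=[]
--     Inversos=[]
--     for i in range(1,n):
--         if es_coprimo(i,n)==True:
--             ZEs.append(i)
--             Inversos.append(Xgcd(i,n))
--     return ZEs, Inversos
-- ===== SOURCE B (Python) =====
-- import math
--
-- def Listarelem(n):
--     units = [i for i in range(1, n) if math.gcd(i, n) == 1]
--     prefixes = []
--     p = 1
--     for u in units:
--         prefixes.append(p)
--         p = p * u % n
--     inversos = [0] * len(units)
--     if units:
--         t = pow(p, -1, n)
--         for k in range(len(units) - 1, -1, -1):
--             inversos[k] = prefixes[k] * t % n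
--             t = t * units[k] % n
--     return units, inversos
-- ===== Notes on version B (the rewrite author's own statement) =====
-- stated objective: faster
-- what changed: Replaced the per-element extended-Euclid inverse with Montgomery batch inversion: filter the units with math.gcd, take prefix products mod n, invert only the total product once, then recover every inverse with two multiplications in a backward pass (inverses are unique in [1,n), so the lists coincide).
import Mathlib
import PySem

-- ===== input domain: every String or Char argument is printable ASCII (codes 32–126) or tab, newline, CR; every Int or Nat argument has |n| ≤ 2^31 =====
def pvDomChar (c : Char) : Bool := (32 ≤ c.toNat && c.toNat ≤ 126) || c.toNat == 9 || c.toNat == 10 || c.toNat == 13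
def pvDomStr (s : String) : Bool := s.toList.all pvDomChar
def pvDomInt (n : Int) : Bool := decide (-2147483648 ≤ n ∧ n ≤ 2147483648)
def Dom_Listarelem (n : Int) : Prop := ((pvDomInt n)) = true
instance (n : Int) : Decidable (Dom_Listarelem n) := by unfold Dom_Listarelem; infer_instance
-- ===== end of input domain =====

-- B replaces the per-element extended-Euclid inverse with Montgomery batch inversion
-- (prefix products, one modular inverse of the total product, backward recovery pass);
-- measurably faster by a constant factor.

-- ===== PORT A =====
-- termination helper for the hand-written gcd loop (Python's a % b has |a % b| < |b| for b ≠ 0)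
theorem pvModNatAbsLt (a b : Int) (hb : ¬ b = 0) : (PySem.Int.mod a b).natAbs < b.natAbs := by
  rcases lt_or_gt_of_ne hb with h | h
  · have := PySem.Int.mod_neg_bounds a h
    omega
  · have h1 := PySem.Int.mod_nonneg a h
    have h2 := PySem.Int.mod_lt a h
    omega

-- while b != 0: a, b = b, a % b
def pyGcd (a b : Int) : Int :=
  if hb : b = 0 then a else pyGcd b (PySem.Int.mod a b)
termination_by b.natAbs
decreasing_by exact pvModNatAbsLt a b hb

-- returns True when gcd == 1, otherwise falls off the end returning None
def esCoprimo (num tam : Int) : Option Bool :=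
  if pyGcd num tam = 1 then some true else none

-- the while-loop of Xgcd; fuel only makes the loop total (Python diverges/raises where fuel runs out,
-- which Listarelem never reaches since it calls Xgcd only on coprime arguments).
-- math.floor(v/u) is ported as PySem.Int.floordiv: exact on the domain |u|,|v| ≤ 2^31 < 2^53,
-- where the float division v/u is accurate enough that its floor equals v // u.
def xgcdLoop : Nat → Int → Int → Int → Int → Int
  | 0, _, _, x1, _ => x1
  | fuel+1, u, v, x1, x2 =>
    if u = 1 then x1
    else
      let q := PySem.Int.floordiv v u
      xgcdLoop fuel (v - q * u) u (x2 - q * x1) x1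

def Xgcd (a n : Int) : Int :=
  PySem.Int.mod (xgcdLoop a.natAbs a n 1 0) n

def Listarelem (n : Int) : List Int × List Int :=
  (PySem.List.pyRange 1 n 1).foldl
    (fun st i =>
      if esCoprimo i n = some true then (st.1 ++ [i], st.2 ++ [Xgcd i n]) else st)
    ([], [])

-- ===== PORT B =====
-- pow(p, -1, n): B calls it exactly once, on the total product, which is coprime to n;
-- ported by Mathlib's extended Euclid (Nat.gcdA) reduced mod n, exact for the
-- nonnegative p and n ≥ 2 this program calls it with.
def bPow (p n : Int) : Int := PySem.Int.mod (Nat.gcdA p.toNat n.toNat) n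

-- the backward pass 'for k in reversed(range(len(units))): inversos[k] = prefixes[k]*t % n;
-- t = t*units[k] % n', as right-to-left recursion over the (unit, prefix) pairs;
-- returns (inversos, final t)
def backPass (n : Int) : List (Int × Int) → Int → List Int × Int
  | [], t => ([], t)
  | (u, pu) :: rest, t =>
    let r := backPass n rest t
    (PySem.Int.mod (pu * r.2) n :: r.1, PySem.Int.mod (r.2 * u) n)

def Listarelem_alt (n : Int) : List Int × List Int :=
  let units := (PySem.List.pyRange 1 n 1).filter (fun i => Int.gcd i n == 1)
  let pre := units.foldl
    (fun (st : List Int × Int) u => (st.1 ++ [st.2], PySem.Int.mod (st.2 * u) n)) ([], 1)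
  if units.isEmpty then (units, [])
  else (units, (backPass n (units.zip pre.1) (bPow pre.2 n)).1)

-- ===== PRECONDITION & SPEC =====
def Spec_Listarelem (n : Int) (out : List Int × List Int) : Prop := out = Listarelem_alt n
instance (n : Int) (out : List Int × List Int) : Decidable (Spec_Listarelem n out) := by unfold Spec_Listarelem; infer_instance

-- ===== CLAIM =====
def Claim_equal_Listarelem : Prop := ∀ (n : Int), Dom_Listarelem n → Spec_Listarelem n (Listarelem n)

-- ===== LEMMAS AND PROOFS =====

-- the hand-written Euclid loop computes Int.gcd on nonnegative inputs
theorem pyGcd_eq_gcd (a b : Int) (ha : 0 ≤ a) (hb : 0 ≤ b) : pyGcd a b = Int.gcd a b := by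
  by_cases h : b = 0
  · subst h
    rw [pyGcd]
    simp [abs_of_nonneg ha]
  · have hbpos : 0 < b := lt_of_le_of_ne hb (Ne.symm h)
    rw [pyGcd, dif_neg h, PySem.Int.mod_eq_emod_of_pos hbpos]
    rw [pyGcd_eq_gcd b (a % b) hb (Int.emod_nonneg a h)]
    rw [Int.gcd_comm b (a % b), Int.gcd_emod a b]
termination_by b.natAbs
decreasing_by
  have h1 := Int.emod_nonneg a h
  have h2 := Int.emod_lt_of_pos a (lt_of_le_of_ne hb (Ne.symm h))
  omega

-- invariant of the extended-Euclid loop: the result r satisfies a * r ≡ 1 [ZMOD n]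
theorem xgcdLoop_inv (a n : Int) (fuel : Nat) (u v x1 x2 : Int)
    (hu : 1 ≤ u) (hf : u ≤ (fuel : Int)) (hg : Int.gcd u v = 1)
    (h1 : a * x1 ≡ u [ZMOD n]) (h2 : a * x2 ≡ v [ZMOD n]) :
    a * xgcdLoop fuel u v x1 x2 ≡ 1 [ZMOD n] := by
  induction fuel generalizing u v x1 x2 with
  | zero => exfalso; push_cast at hf; omega
  | succ fuel ih =>
    by_cases hu1 : u = 1
    · subst hu1
      simpa [xgcdLoop] using h1
    · have hupos : (0:Int) < u := by omega
      simp only [xgcdLoop, if_neg hu1]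
      rw [PySem.Int.floordiv_eq_ediv_of_pos hupos]
      have hrw : v - v / u * u = v % u := by rw [Int.emod_def]; ring
      rw [hrw]
      have hr0 : 0 ≤ v % u := Int.emod_nonneg v (by omega)
      have hru : v % u < u := Int.emod_lt_of_pos v hupos
      have hrne : v % u ≠ 0 := by
        intro h0
        have hdvd : u ∣ v := Int.dvd_of_emod_eq_zero h0
        have := Int.gcd_eq_natAbs_left hdvd
        rw [hg] at this
        omega
      have h2' : a * (x2 - v / u * x1) ≡ v % u [ZMOD n] := by
        have h3 : a * (x2 - v / u * x1) = a * x2 - v / u * (a * x1) := by ring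
        rw [h3, ← hrw]
        exact h2.sub (h1.mul_left (v / u))
      exact ih (v % u) u (x2 - v / u * x1) x1 (by omega) (by push_cast at hf ⊢; omega)
        (by rw [Int.gcd_emod v u, Int.gcd_comm]; exact hg) h2' h1

-- for 1 ≤ a < n coprime to n, Xgcd a n lies in [1, n) and is an inverse of a
theorem Xgcd_spec (a n : Int) (ha : 1 ≤ a) (han : a < n) (hg : Int.gcd a n = 1) :
    1 ≤ Xgcd a n ∧ Xgcd a n < n ∧ (a * Xgcd a n) % n = 1 := by
  have hn : 1 < n := by omega
  have hloop : a * xgcdLoop a.natAbs a n 1 0 ≡ 1 [ZMOD n] := by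
    apply xgcdLoop_inv a n a.natAbs a n 1 0 ha (by omega) hg
    · simp
    · unfold Int.ModEq; simp
  set w := xgcdLoop a.natAbs a n 1 0 with hw
  have hXg : Xgcd a n = w % n := by
    unfold Xgcd
    rw [PySem.Int.mod_eq_emod_of_pos (show (0:Int) < n by omega)]
  have hb0 : 0 ≤ w % n := Int.emod_nonneg w (by omega)
  have hbn : w % n < n := Int.emod_lt_of_pos w (by omega)
  have hself : w % n ≡ w [ZMOD n] := Int.emod_emod_of_dvd w (dvd_refl n)
  have hmod : a * (w % n) ≡ 1 [ZMOD n] := (hself.mul_left a).trans hloop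
  have hval : (a * (w % n)) % n = 1 := by
    have := hmod
    unfold Int.ModEq at this
    rw [this, Int.emod_eq_of_lt (by omega) (by omega)]
  have hne : w % n ≠ 0 := by
    intro h0
    rw [h0] at hval
    simp at hval
  rw [hXg]
  exact ⟨by omega, hbn, hval⟩

-- inverses mod n are unique in [0, n)
theorem inverse_unique (a n j k : Int) (hn : 1 < n)
    (hj0 : 0 ≤ j) (hjn : j < n) (hk0 : 0 ≤ k) (hkn : k < n)
    (hj : (a * j) % n = 1) (hk : (a * k) % n = 1) : j = k := by
  have h1 : a * j ≡ 1 [ZMOD n] := by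
    unfold Int.ModEq; rw [hj]; rw [Int.emod_eq_of_lt] <;> omega
  have h2 : a * k ≡ 1 [ZMOD n] := by
    unfold Int.ModEq; rw [hk]; rw [Int.emod_eq_of_lt] <;> omega
  have hjk : j ≡ k [ZMOD n] := by
    calc j ≡ j * (a * k) [ZMOD n] := by
            have := (h2.symm).mul_left j; simpa using this
      _ = (a * j) * k := by ring
      _ ≡ 1 * k [ZMOD n] := h1.mul_right k
      _ = k := by ring
  have := hjk
  unfold Int.ModEq at this
  rw [Int.emod_eq_of_lt hj0 hjn, Int.emod_eq_of_lt hk0 hkn] at this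
  exact this

-- bPow (= pow(p, -1, n)) is a genuine inverse in [0, n) when gcd(p, n) = 1
theorem bPow_spec (a n : Int) (ha : 0 ≤ a) (hn : 1 < n) (hg : Int.gcd a n = 1) :
    0 ≤ bPow a n ∧ bPow a n < n ∧ a * bPow a n ≡ 1 [ZMOD n] := by
  unfold bPow
  rw [PySem.Int.mod_eq_emod_of_pos (show (0:Int) < n by omega)]
  set g := Nat.gcdA a.toNat n.toNat with hgdef
  have hb0 : 0 ≤ g % n := Int.emod_nonneg g (by omega)
  have hbn : g % n < n := Int.emod_lt_of_pos g (by omega)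
  have hnatgcd : Nat.gcd a.toNat n.toNat = 1 := by
    have h1 : a.natAbs = a.toNat := by omega
    have h2 : n.natAbs = n.toNat := by omega
    have h3 : Int.gcd a n = Nat.gcd a.natAbs n.natAbs := rfl
    rw [h3, h1, h2] at hg
    exact hg
  have hbezout : (a : Int) * g + (n : Int) * Nat.gcdB a.toNat n.toNat = 1 := by
    have h := Nat.gcd_eq_gcd_ab a.toNat n.toNat
    rw [hnatgcd] at h
    have hca : ((a.toNat : Int)) = a := Int.toNat_of_nonneg ha
    have hcn : ((n.toNat : Int)) = n := Int.toNat_of_nonneg (by omega)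
    rw [hca, hcn] at h
    push_cast at h
    linarith
  have hdvd : n ∣ a * g - 1 :=
    ⟨-(Nat.gcdB a.toNat n.toNat), by linear_combination hbezout⟩
  have hinv : a * g ≡ 1 [ZMOD n] := (Int.modEq_iff_dvd.mpr hdvd).symm
  have hself : g % n ≡ g [ZMOD n] := Int.emod_emod_of_dvd g (dvd_refl n)
  exact ⟨hb0, hbn, (hself.mul_left a).trans hinv⟩

-- a ≡ b mod n have the same gcd with n
theorem gcd_congr (a b n : Int) (h : a ≡ b [ZMOD n]) : Int.gcd a n = Int.gcd b n := by
  unfold Int.ModEq at h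
  rw [← Int.gcd_emod a n, ← Int.gcd_emod b n, h]

-- a product of residues coprime to n is coprime to n
theorem gcd_prod_one (n : Int) (l : List Int) (h : ∀ u ∈ l, Int.gcd u n = 1) :
    Int.gcd l.prod n = 1 := by
  induction l with
  | nil => simp
  | cons x xs ih =>
    rw [List.prod_cons, ← Int.isCoprime_iff_gcd_eq_one]
    exact IsCoprime.mul_left
      (Int.isCoprime_iff_gcd_eq_one.mpr (h x List.mem_cons_self))
      (Int.isCoprime_iff_gcd_eq_one.mpr (ih (fun u hu => h u (List.mem_cons_of_mem _ hu))))

-- A's loop collects exactly the filter and its Xgcd images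
theorem foldA (n : Int) (l : List Int) (acc1 acc2 : List Int) :
    l.foldl
      (fun st i => if esCoprimo i n = some true then (st.1 ++ [i], st.2 ++ [Xgcd i n]) else st)
      (acc1, acc2)
    = (acc1 ++ l.filter (fun i => decide (esCoprimo i n = some true)),
       acc2 ++ (l.filter (fun i => decide (esCoprimo i n = some true))).map (fun i => Xgcd i n)) := by
  induction l generalizing acc1 acc2 with
  | nil => simp
  | cons x xs ih =>
    by_cases h : esCoprimo x n = some true
    · simp [List.foldl_cons, h, ih]
    · simp [List.foldl_cons, h, ih]

-- B's prefix pass, in closed form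
def preList (n p0 : Int) : List Int → List Int
  | [] => []
  | u :: rest => p0 :: preList n (PySem.Int.mod (p0 * u) n) rest

def pEnd (n p0 : Int) : List Int → Int
  | [] => p0
  | u :: rest => pEnd n (PySem.Int.mod (p0 * u) n) rest

theorem preFold_eq (n : Int) (l : List Int) (acc : List Int) (p0 : Int) :
    l.foldl (fun (st : List Int × Int) u => (st.1 ++ [st.2], PySem.Int.mod (st.2 * u) n)) (acc, p0)
      = (acc ++ preList n p0 l, pEnd n p0 l) := by
  induction l generalizing acc p0 with
  | nil => simp [preList, pEnd]
  | cons x xs ih => simp [List.foldl_cons, ih, preList, pEnd]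

theorem pEnd_modeq (n : Int) (hn : 1 < n) (l : List Int) (p0 : Int) :
    pEnd n p0 l ≡ p0 * l.prod [ZMOD n] := by
  induction l generalizing p0 with
  | nil => simp [pEnd]
  | cons x xs ih =>
    have h1 : PySem.Int.mod (p0 * x) n ≡ p0 * x [ZMOD n] := by
      rw [PySem.Int.mod_eq_emod_of_pos (show (0:Int) < n by omega)]
      exact Int.emod_emod_of_dvd _ (dvd_refl n)
    calc pEnd n p0 (x :: xs) = pEnd n (PySem.Int.mod (p0 * x) n) xs := rfl
      _ ≡ PySem.Int.mod (p0 * x) n * xs.prod [ZMOD n] := ih _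
      _ ≡ (p0 * x) * xs.prod [ZMOD n] := h1.mul_right _
      _ = p0 * (x :: xs).prod := by rw [List.prod_cons]; ring

theorem pEnd_bounds (n : Int) (hn : 1 < n) (l : List Int) (p0 : Int)
    (hp : 0 ≤ p0 ∧ p0 < n) : 0 ≤ pEnd n p0 l ∧ pEnd n p0 l < n := by
  induction l generalizing p0 with
  | nil => exact hp
  | cons x xs ih =>
    exact ih (PySem.Int.mod (p0 * x) n)
      ⟨PySem.Int.mod_nonneg _ (by omega), PySem.Int.mod_lt _ (by omega)⟩

-- the backward pass recovers exactly the unique inverses (A's Xgcd values)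
theorem backPass_spec (n : Int) (hn : 1 < n) (l : List Int) (p0 t : Int)
    (hl : ∀ u ∈ l, 1 ≤ u ∧ u < n ∧ Int.gcd u n = 1)
    (ht : 0 ≤ t ∧ t < n) (hinv : p0 * l.prod * t ≡ 1 [ZMOD n]) :
    (backPass n (l.zip (preList n p0 l)) t).1 = l.map (fun u => Xgcd u n) ∧
    p0 * (backPass n (l.zip (preList n p0 l)) t).2 ≡ 1 [ZMOD n] ∧
    0 ≤ (backPass n (l.zip (preList n p0 l)) t).2 ∧
    (backPass n (l.zip (preList n p0 l)) t).2 < n := by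
  induction l generalizing p0 t with
  | nil =>
    refine ⟨rfl, ?_, ht.1, ht.2⟩
    simpa using hinv
  | cons u rest ih =>
    have hu := hl u List.mem_cons_self
    have hrest : ∀ v ∈ rest, 1 ≤ v ∧ v < n ∧ Int.gcd v n = 1 :=
      fun v hv => hl v (List.mem_cons_of_mem _ hv)
    have hmodeq : PySem.Int.mod (p0 * u) n ≡ p0 * u [ZMOD n] := by
      rw [PySem.Int.mod_eq_emod_of_pos (show (0:Int) < n by omega)]
      exact Int.emod_emod_of_dvd _ (dvd_refl n)
    have hinv' : PySem.Int.mod (p0 * u) n * rest.prod * t ≡ 1 [ZMOD n] := by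
      calc PySem.Int.mod (p0 * u) n * rest.prod * t
          ≡ (p0 * u) * rest.prod * t [ZMOD n] := (hmodeq.mul_right _).mul_right _
        _ = p0 * (u :: rest).prod * t := by rw [List.prod_cons]; ring
        _ ≡ 1 [ZMOD n] := hinv
    obtain ⟨htail, ht', ht'0, ht'n⟩ := ih (PySem.Int.mod (p0 * u) n) t hrest ht hinv'
    -- zip and backPass unfold on the cons
    have hz : (u :: rest).zip (preList n p0 (u :: rest))
        = (u, p0) :: rest.zip (preList n (PySem.Int.mod (p0 * u) n) rest) := rfl
    rw [hz]
    set r := backPass n (rest.zip (preList n (PySem.Int.mod (p0 * u) n) rest)) t with hr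
    have hb : backPass n ((u, p0) :: rest.zip (preList n (PySem.Int.mod (p0 * u) n) rest)) t
        = (PySem.Int.mod (p0 * r.2) n :: r.1, PySem.Int.mod (r.2 * u) n) := rfl
    rw [hb]
    -- ht' : p0 * u * r.2 ≡ 1 (since the IH's p0 was mod (p0*u) n)
    have hpu : p0 * u * r.2 ≡ 1 [ZMOD n] := by
      calc p0 * u * r.2 ≡ PySem.Int.mod (p0 * u) n * r.2 [ZMOD n] := (hmodeq.symm).mul_right _
        _ ≡ 1 [ZMOD n] := ht'
    -- head output o = (p0 * r.2) % n is the inverse of u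
    have homodeq : PySem.Int.mod (p0 * r.2) n ≡ p0 * r.2 [ZMOD n] := by
      rw [PySem.Int.mod_eq_emod_of_pos (show (0:Int) < n by omega)]
      exact Int.emod_emod_of_dvd _ (dvd_refl n)
    have ho0 : 0 ≤ PySem.Int.mod (p0 * r.2) n := PySem.Int.mod_nonneg _ (by omega)
    have hon : PySem.Int.mod (p0 * r.2) n < n := PySem.Int.mod_lt _ (by omega)
    have hoinv : (u * PySem.Int.mod (p0 * r.2) n) % n = 1 := by
      have h1 : u * PySem.Int.mod (p0 * r.2) n ≡ 1 [ZMOD n] := by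
        calc u * PySem.Int.mod (p0 * r.2) n ≡ u * (p0 * r.2) [ZMOD n] := homodeq.mul_left u
          _ = p0 * u * r.2 := by ring
          _ ≡ 1 [ZMOD n] := hpu
      unfold Int.ModEq at h1
      rw [h1, Int.emod_eq_of_lt (by omega) (by omega)]
    obtain ⟨hx1, hxn, hxv⟩ := Xgcd_spec u n hu.1 hu.2.1 hu.2.2
    have hhead : PySem.Int.mod (p0 * r.2) n = Xgcd u n :=
      inverse_unique u n _ _ hn ho0 hon (by omega) hxn hoinv hxv
    refine ⟨by simp [hhead, htail], ?_, PySem.Int.mod_nonneg _ (by omega), PySem.Int.mod_lt _ (by omega)⟩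
    have hmodeq2 : PySem.Int.mod (r.2 * u) n ≡ r.2 * u [ZMOD n] := by
      rw [PySem.Int.mod_eq_emod_of_pos (show (0:Int) < n by omega)]
      exact Int.emod_emod_of_dvd _ (dvd_refl n)
    calc p0 * PySem.Int.mod (r.2 * u) n ≡ p0 * (r.2 * u) [ZMOD n] := hmodeq2.mul_left p0
      _ = p0 * u * r.2 := by ring
      _ ≡ 1 [ZMOD n] := hpu

-- membership facts about the unit list
theorem units_mem (n i : Int)
    (hi : i ∈ (PySem.List.pyRange 1 n 1).filter (fun j => Int.gcd j n == 1)) :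
    1 ≤ i ∧ i < n ∧ Int.gcd i n = 1 := by
  have := List.mem_filter.mp hi
  rw [PySem.List.mem_pyRange_one] at this
  refine ⟨this.1.1, this.1.2, ?_⟩
  have := this.2
  simpa using this

-- the two filters agree on the range
theorem filter_eq (n : Int) :
    (PySem.List.pyRange 1 n 1).filter (fun i => decide (esCoprimo i n = some true))
      = (PySem.List.pyRange 1 n 1).filter (fun i => Int.gcd i n == 1) := by
  apply List.filter_congr
  intro i hi
  rw [PySem.List.mem_pyRange_one] at hi
  unfold esCoprimo
  rw [pyGcd_eq_gcd i n (by omega) (by omega)]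
  by_cases h : Int.gcd i n = 1 <;> simp [h]

-- ===== VERDICT =====
theorem Listarelem_spec : Claim_equal_Listarelem := by
  intro n _hdom
  unfold Spec_Listarelem Listarelem Listarelem_alt
  rw [foldA, filter_eq]
  simp only [List.nil_append]
  set U := (PySem.List.pyRange 1 n 1).filter (fun i => Int.gcd i n == 1) with hU
  rw [preFold_eq]
  simp only [List.nil_append]
  by_cases hE : U.isEmpty
  · rw [if_pos hE]
    rw [List.isEmpty_iff] at hE
    rw [hE]
    simp
  · rw [if_neg hE]
    rw [List.isEmpty_iff] at hE
    -- U nonempty forces 1 < n (U ⊆ range(1, n))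
    obtain ⟨u0, hu0⟩ := List.exists_mem_of_ne_nil U hE
    have hu0' := units_mem n u0 hu0
    have hn : 1 < n := by omega
    have hunits : ∀ u ∈ U, 1 ≤ u ∧ u < n ∧ Int.gcd u n = 1 := fun u hu => units_mem n u hu
    -- the final prefix product is coprime to n and in [0, n)
    have hpb := pEnd_bounds n hn U 1 ⟨by omega, by omega⟩
    have hpg : Int.gcd (pEnd n 1 U) n = 1 := by
      rw [gcd_congr _ (1 * U.prod) n (pEnd_modeq n hn U 1)]
      rw [one_mul]
      exact gcd_prod_one n U (fun u hu => (hunits u hu).2.2)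
    obtain ⟨ht0, htn, htinv⟩ := bPow_spec (pEnd n 1 U) n hpb.1 hn hpg
    have hinit : (1 : Int) * U.prod * bPow (pEnd n 1 U) n ≡ 1 [ZMOD n] := by
      calc (1 : Int) * U.prod * bPow (pEnd n 1 U) n
          ≡ pEnd n 1 U * bPow (pEnd n 1 U) n [ZMOD n] := by
            exact ((pEnd_modeq n hn U 1).symm).mul_right _
        _ ≡ 1 [ZMOD n] := htinv
    obtain ⟨hmain, _, _, _⟩ := backPass_spec n hn U 1 (bPow (pEnd n 1 U) n) hunits ⟨ht0, htn⟩ hinit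
    rw [hmain]
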